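-- pv_equiv track=rewrite | github.com/ziqun-liu/TIP103-3 | week2/session1/week2_session1_problem4.py | can_make_balanced
-- ===== SOURCE A (Python) =====
-- def can_make_balanced(code):
--     """
--     UMPIRE
--     Understand:
--         - In: string
--         - Out: boolean
--     Match:
--         - parse string
--     Plan:
--         - Use a hashmap to keep track of the frequency of each letter present in the string
--         - Maintain an allowed_remove variable
--         - Maintain a prev_cnt variable
--         - If curr_cnt != prev_cnt, then decrement allowed remove
--     """
--     freq = {}
--     for ch in code:
--         freq[ch] = freq.get(ch, 0) + 1
--
--     # Trey to decrement by 1 all char's frequencies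
--     for ch in freq:
--         # make a copy and delete one char
--         new_freq = freq.copy()
--         new_freq[ch] -= 1
--         # If the frequency of ch becomes 0 after decrement, delete the key `ch`
--         if new_freq[ch] == 0:
--             del new_freq[ch]
--
--         # Check if all frequencies are equal
--         values = list(new_freq.values())
--         if (len(set(values)) == 1):  # All frequencies are equal
--             return True
--
--     return False
-- ===== SOURCE B (Python) =====
-- def can_make_balanced(code):
--     counts = {}
--     for ch in code:
--         counts[ch] = counts.get(ch, 0) + 1
--
--     # frequency-of-frequencies buckets
--     bucket = {}
--     for v in counts.values():
--         bucket[v] = bucket.get(v, 0) + 1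
--
--     # test each distinct count in O(1): move one char from count c to c - 1
--     for c in bucket:
--         nb = len(bucket)
--         if bucket[c] == 1:
--             nb -= 1                      # count c disappears
--         if c > 1 and (c - 1) not in bucket:
--             nb += 1                      # count c - 1 appears
--         if nb == 1:
--             return True
--     return False
-- ===== Notes on version B (the rewrite author's own statement) =====
-- stated objective: alternative
-- what changed: B builds a frequency-of-frequencies bucket map once and decides each distinct candidate count by bucket-size arithmetic, where A copies the whole frequency dict per distinct character and rescans all its values for equality; total cost is dominated by the counting pass in both.
import Mathlib
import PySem

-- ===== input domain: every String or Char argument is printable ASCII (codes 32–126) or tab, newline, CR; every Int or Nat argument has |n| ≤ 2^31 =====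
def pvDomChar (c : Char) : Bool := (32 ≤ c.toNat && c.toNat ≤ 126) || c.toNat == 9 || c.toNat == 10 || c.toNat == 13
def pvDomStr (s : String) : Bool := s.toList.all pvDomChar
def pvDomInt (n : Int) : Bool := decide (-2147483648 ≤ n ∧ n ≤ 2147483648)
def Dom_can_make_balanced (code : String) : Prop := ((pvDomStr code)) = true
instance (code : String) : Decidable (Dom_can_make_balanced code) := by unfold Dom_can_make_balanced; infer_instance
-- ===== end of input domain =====

-- B decides the question with a different data structure: a frequency-of-frequencies bucket
-- map, built once, answers each distinct candidate count by bucket-size arithmetic, where A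
-- copies the whole dict per character and rescans its values (objective: alternative).

-- ===== PORT A =====
def can_make_balanced (code : String) : Bool :=
  let freq := code.toList.foldl (fun d ch => d.insert ch (d.getD ch 0 + 1))
    (PySem.Dict.empty : PySem.Dict Char Int)
  freq.keys.any (fun ch =>
    let nf1 := freq.modify ch 0 (fun x => x - 1)
    let nf := if nf1.getD ch 0 == 0 then nf1.erase ch else nf1
    PySem.Set.len (PySem.Set.ofList nf.values) == 1)

-- ===== PORT B =====
def can_make_balanced_alt (code : String) : Bool :=
  let counts := code.toList.foldl (fun d ch => d.insert ch (d.getD ch 0 + 1))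
    (PySem.Dict.empty : PySem.Dict Char Int)
  let bucket := counts.values.foldl (fun d v => d.insert v (d.getD v 0 + 1))
    (PySem.Dict.empty : PySem.Dict Int Int)
  bucket.keys.any (fun c =>
    let nb0 : Int := bucket.size
    let nb1 : Int := if bucket.getD c 0 == 1 then nb0 - 1 else nb0
    let nb2 : Int := if decide (1 < c) && !(bucket.contains (c - 1)) then nb1 + 1 else nb1
    nb2 == 1)

-- ===== PRECONDITION & SPEC =====
def Spec_can_make_balanced (code : String) (out : Bool) : Prop := out = can_make_balanced_alt code
instance (code : String) (out : Bool) : Decidable (Spec_can_make_balanced code out) := by unfold Spec_can_make_balanced; infer_instance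

-- ===== CLAIM (what is proved, stated in full; the proofs are below) =====
def Claim_equal_can_make_balanced : Prop := ∀ (code : String), Dom_can_make_balanced code → Spec_can_make_balanced code (can_make_balanced code)

-- ===== LEMMAS AND PROOFS =====

-- A's per-key check, with freq already identified as the counter of the characters
def pvACheck (xs : List Char) (ch : Char) : Bool :=
  let freq := PySem.Dict.counter xs
  let nf1 := freq.modify ch 0 (fun x => x - 1)
  let nf := if nf1.getD ch 0 == 0 then nf1.erase ch else nf1
  PySem.Set.len (PySem.Set.ofList nf.values) == 1

-- B's per-distinct-count check, with bucket identified as the counter of the value list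
def pvBCheck (vs : List Int) (c : Int) : Bool :=
  let bucket := PySem.Dict.counter vs
  let nb0 : Int := bucket.size
  let nb1 : Int := if bucket.getD c 0 == 1 then nb0 - 1 else nb0
  let nb2 : Int := if decide (1 < c) && !(bucket.contains (c - 1)) then nb1 + 1 else nb1
  nb2 == 1

-- the multiset of counts of the OTHER characters
def pvWs (xs : List Char) (ch : Char) : List Int :=
  ((PySem.Set.ofList xs : List Char).erase ch).map (fun k => (xs.count k : Int))

lemma pv_len_ofList (l : List Int) :
    PySem.Set.len (PySem.Set.ofList l) = (l.toFinset.card : Int) := by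
  have hnd := PySem.Set.nodup_ofList l
  have h1 : (PySem.Set.ofList l : List Int).toFinset = l.toFinset := by
    ext a; simp [List.mem_toFinset, PySem.Set.mem_ofList]
  simp [PySem.Set.len, ← List.toFinset_card_of_nodup hnd, h1]

lemma pv_perm_toFinset {l₁ l₂ : List Int} (h : l₁.Perm l₂) : l₁.toFinset = l₂.toFinset := by
  ext a; simp [List.mem_toFinset, h.mem_iff]

lemma pv_any_ofList {α : Type} [BEq α] [LawfulBEq α] (l : List α) (f : α → Bool) :
    (PySem.Set.ofList l : List α).any f = l.any f := by
  by_cases h : ∃ x ∈ l, f x = true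
  · obtain ⟨x, hx, hfx⟩ := h
    rw [List.any_eq_true.mpr ⟨x, (PySem.Set.mem_ofList l x).mpr hx, hfx⟩,
        List.any_eq_true.mpr ⟨x, hx, hfx⟩]
  · have h1 : ¬ ∃ x ∈ (PySem.Set.ofList l : List α), f x = true := by
      rintro ⟨x, hx, hfx⟩; exact h ⟨x, (PySem.Set.mem_ofList l x).mp hx, hfx⟩
    rw [Bool.eq_false_iff.mpr (fun hc => h1 (List.any_eq_true.mp hc)),
        Bool.eq_false_iff.mpr (fun hc => h (List.any_eq_true.mp hc))]

lemma pv_filter_map_insert {κ ν : Type} [BEq κ] [LawfulBEq κ] (l : List (κ × ν)) (k : κ) (v : ν) :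
    (l.map (fun p => if p.1 == k then (k, v) else p)).filter (fun p => !(p.1 == k))
      = l.filter (fun p => !(p.1 == k)) := by
  induction l with
  | nil => rfl
  | cons p t ih => by_cases h : p.1 == k <;> simp_all

lemma pv_erase_insert_self {κ ν : Type} [BEq κ] [LawfulBEq κ] (d : PySem.Dict κ ν) (k : κ) (v : ν) :
    (d.insert k v).erase k = d.erase k := by
  unfold PySem.Dict.insert PySem.Dict.erase
  by_cases h : d.contains k
  · simp only [h, if_true]
    exact congrArg PySem.Dict.mk (pv_filter_map_insert d.items k v)
  · simp_all

lemma pv_values_erase_counter (xs : List Char) (ch : Char) :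
    ((PySem.Dict.counter xs).erase ch).values = pvWs xs ch := by
  have hnd : ((PySem.Set.ofList xs) : List Char).Nodup := PySem.Set.nodup_ofList xs
  simp only [pvWs, PySem.Dict.values, PySem.Dict.erase, PySem.Dict.items_counter]
  rw [List.filter_map, List.map_map, hnd.erase_eq_filter ch]
  simp [Function.comp_def, bne]

lemma pvA_eval (xs : List Char) (ch : Char) (hx : ch ∈ xs) :
    pvACheck xs ch
      = ((if xs.count ch = 1 then ((pvWs xs ch).toFinset.card : Int)
          else ((insert ((xs.count ch : Int) - 1) (pvWs xs ch).toFinset).card : Int)) == 1) := by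
  have hc : (PySem.Dict.counter xs).contains ch = true := by
    simp [PySem.Dict.contains_counter, hx]
  have hcount : 0 < xs.count ch := List.count_pos_iff.mpr hx
  unfold pvACheck
  simp only [PySem.Dict.modify, PySem.Dict.getD_counter, PySem.Dict.getD_insert_self]
  by_cases h1 : xs.count ch = 1
  · have hcond : (((xs.count ch : Int) - 1) == 0) = true := by simp [h1]
    rw [hcond, if_pos rfl, pv_erase_insert_self, pv_values_erase_counter, pv_len_ofList]
    rw [if_pos h1]
  · have hcond : (((xs.count ch : Int) - 1) == 0) = false := by
      simp; omega
    rw [hcond, if_neg Bool.false_ne_true, if_neg h1]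
    have hk : ((PySem.Dict.counter xs).insert ch ((xs.count ch : Int) - 1)).keys
        = (PySem.Set.ofList xs : List Char) := by
      rw [PySem.Dict.keys_insert_of_contains _ _ hc, PySem.Dict.keys_counter]
    have hnd' : ((PySem.Dict.counter xs).insert ch ((xs.count ch : Int) - 1)).keys.Nodup := by
      rw [hk]; exact PySem.Set.nodup_ofList xs
    rw [PySem.Dict.values_eq_map_keys _ hnd' 0, hk, pv_len_ofList]
    have hmem : ch ∈ (PySem.Set.ofList xs : List Char) := (PySem.Set.mem_ofList xs ch).mpr hx
    have hperm : ((PySem.Set.ofList xs : List Char).map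
          (fun k => ((PySem.Dict.counter xs).insert ch ((xs.count ch : Int) - 1)).getD k 0)).Perm
        (((xs.count ch : Int) - 1) :: pvWs xs ch) := by
      have hp := (List.perm_cons_erase hmem).map
        (fun k => ((PySem.Dict.counter xs).insert ch ((xs.count ch : Int) - 1)).getD k 0)
      refine hp.trans ?_
      simp only [List.map_cons, PySem.Dict.getD_insert_self]
      refine List.Perm.cons _ ?_
      have hmapeq : ((PySem.Set.ofList xs : List Char).erase ch).map
          (fun k => ((PySem.Dict.counter xs).insert ch ((xs.count ch : Int) - 1)).getD k 0)
          = pvWs xs ch := by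
        unfold pvWs
        refine List.map_congr_left (fun k hk' => ?_)
        have hne : k ≠ ch := ((PySem.Set.nodup_ofList xs).mem_erase_iff.mp hk').1
        rw [PySem.Dict.getD_insert_of_ne _ _ _ hne, PySem.Dict.getD_counter]
      rw [hmapeq]
    rw [pv_perm_toFinset hperm]
    simp

lemma pvB_eval (vs : List Int) (c : Int) :
    pvBCheck vs c
      = ((((vs.toFinset.card : Int) - (if vs.count c = 1 then 1 else 0))
          + (if 1 < c ∧ (c - 1) ∉ vs then 1 else 0)) == 1) := by
  have hsize : (PySem.Dict.counter vs).size = vs.toFinset.card := by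
    simp only [PySem.Dict.size, PySem.Dict.items_counter, List.length_map]
    rw [← List.toFinset_card_of_nodup (PySem.Set.nodup_ofList vs)]
    congr 1
    ext a; simp [List.mem_toFinset, PySem.Set.mem_ofList]
  unfold pvBCheck
  simp only [PySem.Dict.getD_counter, PySem.Dict.contains_counter, hsize]
  by_cases h1 : vs.count c = 1 <;> by_cases h2 : 1 < c <;> by_cases h3 : (c - 1) ∈ vs <;>
    simp [h1, h2, h3]

lemma pv_key (xs : List Char) (ch : Char) (hx : ch ∈ xs) :
    pvACheck xs ch
      = pvBCheck ((PySem.Set.ofList xs : List Char).map (fun k => (xs.count k : Int)))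
          ((xs.count ch : Int)) := by
  rw [pvA_eval xs ch hx, pvB_eval]
  congr 1
  have hK : ch ∈ (PySem.Set.ofList xs : List Char) := (PySem.Set.mem_ofList xs ch).mpr hx
  have hperm : ((PySem.Set.ofList xs : List Char).map (fun k => (xs.count k : Int))).Perm
      (((xs.count ch : Int)) :: pvWs xs ch) := by
    simpa [pvWs] using (List.perm_cons_erase hK).map (fun k => (xs.count k : Int))
  have hpos : 0 < xs.count ch := List.count_pos_iff.mpr hx
  set c : Int := (xs.count ch : Int) with hc
  set ws := pvWs xs ch with hws
  set vs := (PySem.Set.ofList xs : List Char).map (fun k => (xs.count k : Int)) with hvs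
  have hTF : vs.toFinset = insert c ws.toFinset := by
    rw [pv_perm_toFinset hperm]; simp
  have hcnt : vs.count c = ws.count c + 1 := by
    rw [hperm.count_eq]; simp
  have hmem1 : ((c - 1) ∈ vs) ↔ ((c - 1) ∈ ws) := by
    rw [hperm.mem_iff, List.mem_cons]
    have hne : c - 1 ≠ c := by omega
    tauto
  have hDcard : vs.toFinset.card
      = (if 0 < ws.count c then ws.toFinset.card else ws.toFinset.card + 1) := by
    rw [hTF]; by_cases hcm : c ∈ ws
    · rw [if_pos (List.count_pos_iff.mpr hcm),
          Finset.insert_eq_self.mpr (List.mem_toFinset.mpr hcm)]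
    · rw [if_neg (by simpa [List.count_pos_iff] using hcm),
          Finset.card_insert_of_notMem (by simpa using hcm)]
  have hIcard : (insert (c - 1) ws.toFinset).card
      = (if 0 < ws.count (c - 1) then ws.toFinset.card else ws.toFinset.card + 1) := by
    by_cases hm : (c - 1) ∈ ws
    · rw [if_pos (List.count_pos_iff.mpr hm),
          Finset.insert_eq_self.mpr (List.mem_toFinset.mpr hm)]
    · rw [if_neg (by simpa [List.count_pos_iff] using hm),
          Finset.card_insert_of_notMem (by simpa using hm)]
  rw [hDcard, hIcard]
  simp only [hcnt, hmem1, ← List.count_pos_iff]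
  split_ifs <;> omega

lemma pvA_norm (code : String) :
    can_make_balanced code
      = (PySem.Set.ofList code.toList : List Char).any (pvACheck code.toList) := by
  have h1 : can_make_balanced code
      = (PySem.Dict.counter code.toList).keys.any (pvACheck code.toList) := rfl
  rw [h1, PySem.Dict.keys_counter]

lemma pv_values_counter (xs : List Char) :
    (PySem.Dict.counter xs).values
      = (PySem.Set.ofList xs : List Char).map (fun k => (xs.count k : Int)) := by
  simp [PySem.Dict.values, PySem.Dict.items_counter]

lemma pvB_norm (code : String) :
    can_make_balanced_alt code
      = ((PySem.Dict.counter code.toList).values).any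
          (pvBCheck ((PySem.Dict.counter code.toList).values)) := by
  have h1 : can_make_balanced_alt code
      = (PySem.Dict.counter (PySem.Dict.counter code.toList).values).keys.any
          (pvBCheck (PySem.Dict.counter code.toList).values) := rfl
  rw [h1, PySem.Dict.keys_counter, pv_any_ofList]

-- ===== VERDICT (by name: the statement is the Claim_ definition above) =====
theorem can_make_balanced_spec : Claim_equal_can_make_balanced := by
  intro code _
  unfold Spec_can_make_balanced
  rw [pvA_norm, pvB_norm, pv_values_counter, List.any_map]
  refine PySem.List.any_congr_mem (fun ch hch => ?_)
  exact pv_key code.toList ch ((PySem.Set.mem_ofList _ _).mp hch)
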